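-- pv_equiv track=rewrite | github.com/Imfirn/PythonLab | Lab3/intothewood2.py | new_s
-- ===== SOURCE A (Python) =====
-- def new_s(x):
--     t,f = 0,0
--     listt = []
--     for i in range(len(x)):
--         f = x.pop()
--         if f > t:
--             listt.append(f)
--             t = f
--     for i in range(len(listt)):
--         x.append(listt.pop())
--     return x
-- ===== SOURCE B (Python) =====
-- def new_s(x):
--     # Keep each positive element that is strictly greater than everything to its right.
--     x[:] = [e for i, e in enumerate(x) if e > 0 and all(e > r for r in x[i+1:])]
--     return x
-- ===== Notes on version B (the rewrite author's own statement) =====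
-- stated objective: simpler
-- what changed: A's two destructive passes (pop every element right-to-left while tracking a running maximum, then pop the kept list back onto x) are replaced by a one-line declarative filter that keeps each positive element strictly greater than everything to its right.
import Mathlib
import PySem

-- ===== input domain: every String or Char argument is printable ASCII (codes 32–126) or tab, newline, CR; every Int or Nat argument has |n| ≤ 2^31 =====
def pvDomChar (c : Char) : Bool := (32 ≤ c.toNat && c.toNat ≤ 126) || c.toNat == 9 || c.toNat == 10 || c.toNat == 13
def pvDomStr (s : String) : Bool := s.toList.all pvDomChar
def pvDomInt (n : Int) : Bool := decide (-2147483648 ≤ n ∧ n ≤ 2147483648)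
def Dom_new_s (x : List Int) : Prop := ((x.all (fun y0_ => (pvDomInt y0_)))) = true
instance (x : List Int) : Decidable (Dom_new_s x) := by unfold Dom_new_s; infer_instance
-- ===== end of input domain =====

-- B replaces A's two destructive passes (pop right-to-left tracking a running max, then
-- pop the kept list back) with a declarative filter: keep each positive element strictly
-- greater than everything to its right (simpler; same return value). Both Pythons mutate
-- x in place; the equivalence proved here is about the return value.


-- ===== PORT A =====
-- first loop: `for i in range(len(x)): f = x.pop(); if f > t: listt.append(f); t = f`
-- run len(x) times, so x.pop() always sees a nonempty x (getLast!/dropLast are exact here)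
def new_sLoop1 : Nat → List Int → Int → List Int → (List Int × Int × List Int)
  | 0, xs, t, listt => (xs, t, listt)
  | n + 1, xs, t, listt =>
      let f := xs.getLast!          -- f = x.pop()
      let xs' := xs.dropLast
      if f > t then new_sLoop1 n xs' f (listt ++ [f])
      else new_sLoop1 n xs' t listt

-- second loop: `for i in range(len(listt)): x.append(listt.pop())`
def new_sLoop2 : Nat → List Int → List Int → (List Int × List Int)
  | 0, listt, xs => (listt, xs)
  | n + 1, listt, xs => new_sLoop2 n listt.dropLast (xs ++ [listt.getLast!])

def new_s (x : List Int) : List Int :=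
  let r := new_sLoop1 x.length x 0 []        -- t starts at 0, listt = []
  (new_sLoop2 r.2.2.length r.2.2 r.1).2

-- ===== PORT B =====
-- `x[:] = [e for i, e in enumerate(x) if e > 0 and all(e > r for r in x[i+1:])]; return x`
def new_s_alt (x : List Int) : List Int :=
  ((PySem.List.enumerate x).filter
      (fun p => decide (p.2 > 0) &&
        (PySem.List.slice x (some (p.1 + 1)) none).all (fun r => decide (p.2 > r)))).map
    Prod.snd

-- ===== PRECONDITION & SPEC =====
def Spec_new_s (x : List Int) (out : List Int) : Prop := out = new_s_alt x
instance (x : List Int) (out : List Int) : Decidable (Spec_new_s x out) := by unfold Spec_new_s; infer_instance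

-- ===== CLAIM (what is proved, stated in full; the proofs are below) =====
def Claim_equal_new_s : Prop := ∀ (x : List Int), Dom_new_s x → Spec_new_s x (new_s x)

-- ===== LEMMAS AND PROOFS =====

theorem getLast!_concat' (ys : List Int) (f : Int) : (ys ++ [f]).getLast! = f := by
  simp [List.getLast!_eq_getLast?_getD, List.getLast?_append]

-- right-to-left "keep strictly increasing values above threshold t" (on the reversed list)
def srKeep : List Int → Int → List Int
  | [], _ => []
  | f :: rest, t => if f > t then f :: srKeep rest f else srKeep rest t

theorem loop1_eq : ∀ (l : List Int) (t : Int) (listt : List Int),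
    ∃ t', new_sLoop1 l.length l t listt = ([], t', listt ++ srKeep l.reverse t) := by
  intro l
  induction l using List.reverseRecOn with
  | nil => intro t listt; exact ⟨t, by simp [new_sLoop1, srKeep]⟩
  | append_singleton ys f ih =>
      intro t listt
      have hlen : (ys ++ [f]).length = ys.length + 1 := by simp
      rw [hlen]
      simp only [new_sLoop1]
      have hgl : (ys ++ [f]).getLast! = f := getLast!_concat' ys f
      have hdl : (ys ++ [f]).dropLast = ys := by simp
      rw [hgl, hdl]
      have hrev : (ys ++ [f]).reverse = f :: ys.reverse := by simp
      by_cases hf : f > t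
      · simp only [if_pos hf]
        obtain ⟨t', h⟩ := ih f (listt ++ [f])
        exact ⟨t', by rw [h, hrev]; simp [srKeep, hf]⟩
      · simp only [if_neg hf]
        obtain ⟨t', h⟩ := ih t listt
        exact ⟨t', by rw [h, hrev]; simp [srKeep, hf]⟩

theorem loop2_eq : ∀ (l xs : List Int), (new_sLoop2 l.length l xs).2 = xs ++ l.reverse := by
  intro l
  induction l using List.reverseRecOn with
  | nil => intro xs; simp [new_sLoop2]
  | append_singleton ys f ih =>
      intro xs
      have hlen : (ys ++ [f]).length = ys.length + 1 := by simp
      rw [hlen]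
      simp only [new_sLoop2]
      have hgl : (ys ++ [f]).getLast! = f := getLast!_concat' ys f
      have hdl : (ys ++ [f]).dropLast = ys := by simp
      rw [hgl, hdl, ih]
      simp

theorem new_s_eq (x : List Int) : new_s x = (srKeep x.reverse 0).reverse := by
  unfold new_s
  obtain ⟨t', h⟩ := loop1_eq x 0 []
  rw [h]; simp only [List.nil_append]
  rw [loop2_eq]
  simp

-- left-to-right characterisation: keep e iff e > t and e beats everything after it
def hKeep (t : Int) : List Int → List Int
  | [] => []
  | e :: rest => if e > t ∧ ∀ r ∈ rest, e > r then e :: hKeep t rest else hKeep t rest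

theorem hKeep_append (e : Int) : ∀ (p : List Int) (t : Int),
    hKeep t (p ++ [e]) = hKeep (max t e) p ++ (if e > t then [e] else []) := by
  intro p
  induction p with
  | nil =>
      intro t
      by_cases h : e > t <;> simp [hKeep, h]
  | cons a p ih =>
      intro t
      simp only [List.cons_append, hKeep, ih]
      by_cases h1 : a > t ∧ ∀ r ∈ p ++ [e], a > r
      · rw [if_pos h1]
        have h2 : a > max t e ∧ ∀ r ∈ p, a > r := by
          obtain ⟨h1a, h1b⟩ := h1
          have hae := h1b e (by simp)
          exact ⟨by omega, fun r hr => h1b r (by simp [hr])⟩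
        rw [if_pos h2]; simp
      · rw [if_neg h1]
        have h2 : ¬ (a > max t e ∧ ∀ r ∈ p, a > r) := by
          intro ⟨h2a, h2b⟩
          apply h1
          refine ⟨by omega, fun r hr => ?_⟩
          rcases List.mem_append.mp hr with hr | hr
          · exact h2b r hr
          · simp at hr; omega
        rw [if_neg h2]

theorem srKeep_rev_eq_hKeep : ∀ (l : List Int) (t : Int),
    (srKeep l.reverse t).reverse = hKeep t l := by
  intro l
  induction l using List.reverseRecOn with
  | nil => intro t; simp [srKeep, hKeep]
  | append_singleton p e ih =>
      intro t
      have hrev : (p ++ [e]).reverse = e :: p.reverse := by simp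
      rw [hrev, hKeep_append]
      by_cases he : e > t
      · have hm : max t e = e := by omega
        simp only [srKeep, List.reverse_cons, ih, hm, if_pos he]
      · have hm : max t e = t := by omega
        simp only [srKeep, ih, hm, if_neg he, List.append_nil]

-- hKeep with constant threshold 0 is exactly the enumerate/slice filter of port B
theorem alt_core : ∀ (rest : List Int) (s : Nat) (x : List Int), x.drop s = rest →
    ((PySem.List.enumerate rest (s : Int)).filter
        (fun p => decide (p.2 > 0) &&
          (PySem.List.slice x (some (p.1 + 1)) none).all (fun r => decide (p.2 > r)))).map
      Prod.snd = hKeep 0 rest := by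
  intro rest
  induction rest with
  | nil => intro s x _; simp [PySem.List.enumerate_nil, hKeep]
  | cons e rest ih =>
      intro s x hdrop
      have hdrop' : x.drop (s + 1) = rest := by
        have := congrArg List.tail hdrop
        simpa [List.tail_drop] using this
      have hslice : PySem.List.slice x (some ((s : Int) + 1)) none = rest := by
        have : ((s : Int) + 1) = ((s + 1 : Nat) : Int) := by push_cast; ring
        rw [this, PySem.List.slice_from_natCast, hdrop']
      rw [PySem.List.enumerate_cons, List.filter_cons]
      by_cases hc : e > 0 ∧ ∀ r ∈ rest, e > r
      · have hb : (decide (e > 0) &&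
            (PySem.List.slice x (some ((s:Int) + 1)) none).all (fun r => decide (e > r))) = true := by
          rw [hslice]
          simp only [Bool.and_eq_true, decide_eq_true_eq, List.all_eq_true]
          exact ⟨hc.1, fun r hr => by simpa using hc.2 r hr⟩
        simp only [hb, if_pos]
        rw [List.map_cons]
        have : ((s : Int) + 1) = ((s + 1 : Nat) : Int) := by push_cast; ring
        rw [this, ih (s + 1) x hdrop']
        simp only [hKeep, if_pos hc]
      · have hb : (decide (e > 0) &&
            (PySem.List.slice x (some ((s:Int) + 1)) none).all (fun r => decide (e > r))) = false := by
          rw [hslice]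
          by_cases h1 : e > 0
          · have h2 : ¬ ∀ r ∈ rest, e > r := fun hall => hc ⟨h1, hall⟩
            simp only [Bool.and_eq_false_iff]
            right
            simpa [List.all_eq_true] using h2
          · simp [h1]
        simp only [hb, Bool.false_eq_true, if_false]
        have : ((s : Int) + 1) = ((s + 1 : Nat) : Int) := by push_cast; ring
        rw [this, ih (s + 1) x hdrop']
        simp only [hKeep, if_neg hc]

theorem new_s_alt_eq (x : List Int) : new_s_alt x = hKeep 0 x := by
  unfold new_s_alt
  have h0 : ((0 : Nat) : Int) = (0 : Int) := rfl
  have := alt_core x 0 x (by simp)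
  simpa using this

-- ===== VERDICT (by name: the statement is the Claim_ definition above) =====
theorem new_s_spec : Claim_equal_new_s := by
  intro x _
  unfold Spec_new_s
  rw [new_s_eq, new_s_alt_eq, srKeep_rev_eq_hKeep]
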